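-- pv_equiv track=rewrite | github.com/logarithm27/Puzzle_Problem | Utility.py | permute_buttons
-- ===== SOURCE A (Python) =====
-- def permute_buttons(button_1, button_2, blocks):
--     line_ind_1, column_ind_1, line_ind_2, column_ind_2 = 0, 0, 0, 0
--     for line_index, line in enumerate(blocks):
--         for column_index, column in enumerate(line):
--             if column == button_1:
--                 line_ind_1, column_ind_1 = line_index, column_index
--     for line_index, line in enumerate(blocks):
--         for column_index, column in enumerate(line):
--             if column == button_2:
--                 line_ind_2, column_ind_2 = line_index, column_index
--     buff = blocks[line_ind_2][column_ind_2]
--     blocks[line_ind_2][column_ind_2] = blocks[line_ind_1][column_ind_1]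
--     blocks[line_ind_1][column_ind_1] = buff
--     return blocks
-- ===== SOURCE B (Python) =====
-- def permute_buttons(button_1, button_2, blocks):
--     # Build a value -> last-position index in one pass, then rebuild the grid
--     # functionally (no in-place mutation, unlike the original which mutates blocks).
--     pos = {}
--     for i, line in enumerate(blocks):
--         for j, v in enumerate(line):
--             pos[v] = (i, j)
--     i1, j1 = pos.get(button_1, (0, 0))
--     i2, j2 = pos.get(button_2, (0, 0))
--     new1 = blocks[i2][j2]
--     new2 = blocks[i1][j1]
--     return [[new1 if (i, j) == (i1, j1) else new2 if (i, j) == (i2, j2) else v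
--              for j, v in enumerate(line)]
--             for i, line in enumerate(blocks)]
-- ===== Notes on version B (the rewrite author's own statement) =====
-- stated objective: alternative
-- what changed: Replaces A's two exhaustive per-button grid scans and three in-place assignment statements with a single pass that builds a value-to-last-position dictionary, two dictionary lookups with default (0,0), and a functional rebuild of the grid by a nested comprehension (B does not mutate blocks; the equivalence is about the returned value).
-- outside the precondition, e.g. on permute_buttons(1, 2, [[]]): A raises IndexError, B raises IndexError
import Mathlib
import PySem

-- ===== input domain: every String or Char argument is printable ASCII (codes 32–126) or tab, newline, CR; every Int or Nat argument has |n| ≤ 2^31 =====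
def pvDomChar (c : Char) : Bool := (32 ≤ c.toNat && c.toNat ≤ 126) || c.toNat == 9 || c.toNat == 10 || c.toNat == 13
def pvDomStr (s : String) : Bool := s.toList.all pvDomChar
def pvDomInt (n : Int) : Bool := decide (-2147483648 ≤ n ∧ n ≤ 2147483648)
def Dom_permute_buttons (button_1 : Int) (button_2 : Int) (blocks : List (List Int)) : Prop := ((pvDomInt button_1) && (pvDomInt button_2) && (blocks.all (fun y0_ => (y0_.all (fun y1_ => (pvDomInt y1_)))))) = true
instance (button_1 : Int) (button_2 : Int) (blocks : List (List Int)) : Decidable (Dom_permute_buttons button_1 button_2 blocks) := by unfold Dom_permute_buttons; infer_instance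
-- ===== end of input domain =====

-- B builds a value -> last-position dictionary in ONE pass over the grid, looks both buttons
-- up with default (0, 0), and rebuilds the grid functionally with a nested comprehension,
-- instead of A's two exhaustive per-button scans and three in-place assignments; A mutates
-- blocks in place while B does not — the equivalence proved is about the RETURNED value.

-- ===== PORT A =====
-- the Python statement 'blocks[i][j] = v'
def pvSetCell (blocks : List (List Int)) (i j : Int) (v : Int) : List (List Int) :=
  PySem.List.pySetD blocks i (PySem.List.pySetD (PySem.List.pyGetD blocks i []) j v)

-- A's forward full scan: every match overwrites the index pair, starting from (0, 0)
def pvLastPos (button : Int) (blocks : List (List Int)) : Int × Int :=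
  (PySem.List.enumerate blocks).foldl
    (fun acc p =>
      (PySem.List.enumerate p.2).foldl
        (fun a q => if q.2 = button then (p.1, q.1) else a) acc)
    (0, 0)

def permute_buttons (button_1 : Int) (button_2 : Int) (blocks : List (List Int)) : List (List Int) :=
  let p1 := pvLastPos button_1 blocks
  let p2 := pvLastPos button_2 blocks
  let buff := PySem.List.pyGetD (PySem.List.pyGetD blocks p2.1 []) p2.2 0
  let v1 := PySem.List.pyGetD (PySem.List.pyGetD blocks p1.1 []) p1.2 0
  let blocks' := pvSetCell blocks p2.1 p2.2 v1
  pvSetCell blocks' p1.1 p1.2 buff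

-- ===== PORT B =====
-- B's one-pass index: pos[v] = (i, j) for every cell, insertion overwriting earlier entries
def pvPosDict (blocks : List (List Int)) : PySem.Dict Int (Int × Int) :=
  (PySem.List.enumerate blocks).foldl
    (fun d p =>
      (PySem.List.enumerate p.2).foldl
        (fun d q => d.insert q.2 (p.1, q.1)) d)
    PySem.Dict.empty

def permute_buttons_alt (button_1 : Int) (button_2 : Int) (blocks : List (List Int)) : List (List Int) :=
  let pos := pvPosDict blocks
  let q1 := pos.getD button_1 (0, 0)
  let q2 := pos.getD button_2 (0, 0)
  let new1 := PySem.List.pyGetD (PySem.List.pyGetD blocks q2.1 []) q2.2 0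
  let new2 := PySem.List.pyGetD (PySem.List.pyGetD blocks q1.1 []) q1.2 0
  (PySem.List.enumerate blocks).map (fun p =>
    (PySem.List.enumerate p.2).map (fun q =>
      if (p.1, q.1) = q1 then new1 else if (p.1, q.1) = q2 then new2 else q.2))

-- ===== PRECONDITION & SPEC =====
-- Pre_ excludes exactly the inputs where A (and B) raises IndexError: a button that does not
-- occur in the grid leaves its index pair at the default (0, 0), and blocks[0][0] must then exist.
def Pre_permute_buttons (button_1 : Int) (button_2 : Int) (blocks : List (List Int)) : Prop :=
  (button_1 ∈ blocks.flatten ∨ (blocks ≠ [] ∧ blocks.headI ≠ [])) ∧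
  (button_2 ∈ blocks.flatten ∨ (blocks ≠ [] ∧ blocks.headI ≠ []))

instance (button_1 : Int) (button_2 : Int) (blocks : List (List Int)) : Decidable (Pre_permute_buttons button_1 button_2 blocks) := by unfold Pre_permute_buttons; infer_instance

def pvWitness_permute_buttons : Int × Int × List (List Int) := (1, 4, [[1, 2], [3, 4]])

def Spec_permute_buttons (button_1 : Int) (button_2 : Int) (blocks : List (List Int)) (out : List (List Int)) : Prop := out = permute_buttons_alt button_1 button_2 blocks
instance (button_1 : Int) (button_2 : Int) (blocks : List (List Int)) (out : List (List Int)) : Decidable (Spec_permute_buttons button_1 button_2 blocks out) := by unfold Spec_permute_buttons; infer_instance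

-- ===== CLAIM =====
def Claim_equal_permute_buttons : Prop := ∀ (button_1 : Int) (button_2 : Int) (blocks : List (List Int)), Dom_permute_buttons button_1 button_2 blocks → Pre_permute_buttons button_1 button_2 blocks → Spec_permute_buttons button_1 button_2 blocks (permute_buttons button_1 button_2 blocks)

-- ===== LEMMAS AND PROOFS =====

-- an insert-loop dictionary looked up at k equals the keep-last-match fold over the same pairs
theorem pv_getD_foldl_insert {ν : Type} (k : Int) (dflt : ν) :
    ∀ (xs : List (Int × ν)) (d : PySem.Dict Int ν),
      (xs.foldl (fun d p => d.insert p.1 p.2) d).getD k dflt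
        = xs.foldl (fun a p => if p.1 = k then p.2 else a) (d.getD k dflt) := by
  intro xs
  induction xs with
  | nil => intro d; simp
  | cons x xs ih =>
    intro d
    simp only [List.foldl_cons, ih, PySem.Dict.getD_insert]
    by_cases h : k = x.1 <;> simp [h, eq_comm]

-- the flattened (key, value) pair list both loops traverse
def pvPairs (blocks : List (List Int)) : List (Int × (Int × Int)) :=
  (PySem.List.enumerate blocks).flatMap
    (fun p => (PySem.List.enumerate p.2).map (fun q => (q.2, (p.1, q.1))))

theorem pvPosDict_eq_foldl_pairs (blocks : List (List Int)) :
    pvPosDict blocks = (pvPairs blocks).foldl (fun d p => d.insert p.1 p.2) PySem.Dict.empty := by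
  unfold pvPosDict pvPairs
  rw [List.foldl_flatMap]
  simp only [List.foldl_map]

theorem pvLastPos_eq_foldl_pairs (button : Int) (blocks : List (List Int)) :
    pvLastPos button blocks
      = (pvPairs blocks).foldl (fun a p => if p.1 = button then p.2 else a) (0, 0) := by
  unfold pvLastPos pvPairs
  rw [List.foldl_flatMap]
  simp only [List.foldl_map]

theorem pvLastPos_eq_getD (button : Int) (blocks : List (List Int)) :
    pvLastPos button blocks = (pvPosDict blocks).getD button (0, 0) := by
  rw [pvLastPos_eq_foldl_pairs, pvPosDict_eq_foldl_pairs, pv_getD_foldl_insert]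
  simp

-- a keep-last-match fold returns the init or the payload of some list element
theorem pv_foldl_if_mem {α β : Type} (f : α → Prop) [DecidablePred f] (g : α → β) :
    ∀ (xs : List α) (init : β),
      xs.foldl (fun a x => if f x then g x else a) init = init
        ∨ ∃ x ∈ xs, xs.foldl (fun a x => if f x then g x else a) init = g x := by
  intro xs
  induction xs with
  | nil => intro init; left; rfl
  | cons x xs ih =>
    intro init
    rcases ih (if f x then g x else init) with h | ⟨y, hy, h⟩
    · simp only [List.foldl_cons, h]
      by_cases hf : f x
      · right; exact ⟨x, by simp, by simp [hf]⟩
      · left; simp [hf]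
    · right; exact ⟨y, by simp [hy], by simpa using h⟩

theorem pvLastPos_nonneg (button : Int) (blocks : List (List Int)) :
    0 ≤ (pvLastPos button blocks).1 ∧ 0 ≤ (pvLastPos button blocks).2 := by
  rw [pvLastPos_eq_foldl_pairs]
  rcases pv_foldl_if_mem (fun p : Int × (Int × Int) => p.1 = button) (fun p => p.2)
      (pvPairs blocks) (0, 0) with h | ⟨x, hx, h⟩
  · rw [h]; exact ⟨le_refl 0, le_refl 0⟩
  · rw [h]
    unfold pvPairs at hx
    rw [List.mem_flatMap] at hx
    obtain ⟨p, hp, hx2⟩ := hx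
    rw [List.mem_map] at hx2
    obtain ⟨q, hq, hqe⟩ := hx2
    rw [PySem.List.mem_enumerate_iff] at hp hq
    obtain ⟨i, hi, hpe⟩ := hp
    obtain ⟨j, hj, hqe2⟩ := hq
    subst hqe
    constructor
    · show (0 : Int) ≤ p.1; rw [hpe]; simp
    · show (0 : Int) ≤ q.1; rw [hqe2]; simp

-- row-level form of B's inner comprehension as conditional List.set updates
theorem pv_row_eq (i : Int) (row : List Int) (p1 p2 : Int × Int)
    (h2 : 0 ≤ p1.2) (h4 : 0 ≤ p2.2) (w1 w2 : Int) :
    (PySem.List.enumerate row).map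
        (fun q => if (i, q.1) = p1 then w1 else if (i, q.1) = p2 then w2 else q.2)
      = if i = p1.1 then
          (if i = p2.1 then row.set p2.2.toNat w2 else row).set p1.2.toNat w1
        else if i = p2.1 then row.set p2.2.toNat w2 else row := by
  apply List.ext_getElem?
  intro m
  rw [List.getElem?_map, PySem.List.getElem?_enumerate]
  by_cases hmr : m < row.length
  · rw [List.getElem?_eq_getElem hmr, Option.map_some]
    split_ifs with hi1 hi2 hi2' <;>
      (try simp only [Option.map_some, List.getElem?_set, List.length_set]) <;>
      (try split_ifs) <;>
      simp_all [Prod.ext_iff] <;> omega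
  · rw [List.getElem?_eq_none (by omega), Option.map_none]
    split_ifs <;>
      exact (List.getElem?_eq_none (by (try simp only [List.length_set]); omega)).symm

-- A's two in-place writes equal B's nested-map rebuild, for nonnegative positions
theorem pv_set2_eq_map (blocks : List (List Int)) (p1 p2 : Int × Int)
    (h1 : 0 ≤ p1.1) (h2 : 0 ≤ p1.2) (h3 : 0 ≤ p2.1) (h4 : 0 ≤ p2.2) (w1 w2 : Int) :
    pvSetCell (pvSetCell blocks p2.1 p2.2 w2) p1.1 p1.2 w1
      = (PySem.List.enumerate blocks).map (fun p =>
          (PySem.List.enumerate p.2).map (fun q =>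
            if (p.1, q.1) = p1 then w1 else if (p.1, q.1) = p2 then w2 else q.2)) := by
  unfold pvSetCell
  simp only [PySem.List.pySetD_of_nonneg _ _ h1, PySem.List.pySetD_of_nonneg _ _ h2,
    PySem.List.pySetD_of_nonneg _ _ h3, PySem.List.pySetD_of_nonneg _ _ h4,
    PySem.List.pyGetD_of_nonneg _ _ h1, PySem.List.pyGetD_of_nonneg _ _ h3]
  apply List.ext_getElem?
  intro k
  rw [List.getElem?_map, PySem.List.getElem?_enumerate]
  by_cases hk : k < blocks.length
  · have hrow : blocks[k]? = some blocks[k] := List.getElem?_eq_getElem hk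
    set row := blocks[k] with hrv
    simp only [hrow, Option.map_some]
    rw [pv_row_eq (0 + (k : Int)) row p1 p2 h2 h4 w1 w2]
    have hgk : ∀ (Y : List (List Int)), Y.length = blocks.length →
        ((Y.set p1.1.toNat ((Y.getD p1.1.toNat []).set p1.2.toNat w1))[k]?
          = if p1.1.toNat = k then some ((Y.getD p1.1.toNat []).set p1.2.toNat w1) else Y[k]?) := by
      intro Y hY
      rw [List.getElem?_set]
      split_ifs with h h' <;> simp_all
    rw [hgk _ (by simp)]
    have hlen2 : (blocks.set p2.1.toNat ((blocks.getD p2.1.toNat []).set p2.2.toNat w2)).length = blocks.length := by simp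
    have hget2 : (blocks.set p2.1.toNat ((blocks.getD p2.1.toNat []).set p2.2.toNat w2))[k]?
        = if p2.1.toNat = k then some ((blocks.getD p2.1.toNat []).set p2.2.toNat w2) else some row := by
      rw [List.getElem?_set]; split_ifs with h h' <;> simp_all
    have hgdk : ∀ j : Nat, j = k → blocks.getD j [] = row := by
      intro j hj; subst hj
      rw [List.getD_eq_getElem?_getD, hrow, Option.getD_some]
    by_cases e1 : p1.1.toNat = k <;> by_cases e2 : p2.1.toNat = k
    · -- both rows are this row
      have i1 : (0 + (k:Int)) = p1.1 := by omega
      have i2 : (0 + (k:Int)) = p2.1 := by omega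
      rw [if_pos e1, if_pos i1, if_pos i2]
      have : (blocks.set p2.1.toNat ((blocks.getD p2.1.toNat []).set p2.2.toNat w2)).getD p1.1.toNat []
          = (blocks.getD p2.1.toNat []).set p2.2.toNat w2 := by
        rw [List.getD_eq_getElem?_getD, e1, hget2, if_pos e2, Option.getD_some]
      rw [this, hgdk _ e2]
    · have i1 : (0 + (k:Int)) = p1.1 := by omega
      have i2 : ¬ (0 + (k:Int)) = p2.1 := by omega
      rw [if_pos e1, if_pos i1, if_neg i2]
      have : (blocks.set p2.1.toNat ((blocks.getD p2.1.toNat []).set p2.2.toNat w2)).getD p1.1.toNat [] = row := by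
        rw [List.getD_eq_getElem?_getD, e1, hget2, if_neg e2, Option.getD_some]
      rw [this]
    · have i1 : ¬ (0 + (k:Int)) = p1.1 := by omega
      have i2 : (0 + (k:Int)) = p2.1 := by omega
      rw [if_neg e1, if_neg i1, if_pos i2, hget2, if_pos e2, hgdk _ e2]
    · have i1 : ¬ (0 + (k:Int)) = p1.1 := by omega
      have i2 : ¬ (0 + (k:Int)) = p2.1 := by omega
      rw [if_neg e1, if_neg i1, if_neg i2, hget2, if_neg e2]
  · have h1n : blocks[k]? = none := List.getElem?_eq_none (by omega)
    rw [h1n, Option.map_none]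
    apply List.getElem?_eq_none
    simp only [List.length_set]
    omega

theorem permute_buttons_eq (button_1 button_2 : Int) (blocks : List (List Int)) :
    permute_buttons button_1 button_2 blocks = permute_buttons_alt button_1 button_2 blocks := by
  unfold permute_buttons permute_buttons_alt
  simp only [← pvLastPos_eq_getD]
  obtain ⟨a1, a2⟩ := pvLastPos_nonneg button_1 blocks
  obtain ⟨b1, b2⟩ := pvLastPos_nonneg button_2 blocks
  exact pv_set2_eq_map blocks _ _ a1 a2 b1 b2 _ _

-- ===== VERDICT =====
theorem permute_buttons_spec : Claim_equal_permute_buttons := by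
  intro b1 b2 blocks _ _
  unfold Spec_permute_buttons
  exact permute_buttons_eq b1 b2 blocks
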